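-- pv_equiv track=rewrite | github.com/ndhoang1711/demo-git | maze1.py | check_duplicate_values
-- ===== SOURCE A (Python) =====
-- def check_duplicate_values(maze):
--     values = set()
--     for row in maze:
--         for value in row:
--             if value in values:
--                 return True
--             values.add(value)
--     return False
-- ===== SOURCE B (Python) =====
-- def check_duplicate_values(maze):
--     seen = {v for row in maze for v in row}
--     total = sum(len(row) for row in maze)
--     return len(seen) < total
-- ===== Notes on version B (the rewrite author's own statement) =====
-- stated objective: simpler
-- what changed: Replaces the incremental membership-check loop with early return by two whole-grid aggregates (set of all values, total count) compared at the end: a duplicate exists iff the unique count is below the total count.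
import Mathlib
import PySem

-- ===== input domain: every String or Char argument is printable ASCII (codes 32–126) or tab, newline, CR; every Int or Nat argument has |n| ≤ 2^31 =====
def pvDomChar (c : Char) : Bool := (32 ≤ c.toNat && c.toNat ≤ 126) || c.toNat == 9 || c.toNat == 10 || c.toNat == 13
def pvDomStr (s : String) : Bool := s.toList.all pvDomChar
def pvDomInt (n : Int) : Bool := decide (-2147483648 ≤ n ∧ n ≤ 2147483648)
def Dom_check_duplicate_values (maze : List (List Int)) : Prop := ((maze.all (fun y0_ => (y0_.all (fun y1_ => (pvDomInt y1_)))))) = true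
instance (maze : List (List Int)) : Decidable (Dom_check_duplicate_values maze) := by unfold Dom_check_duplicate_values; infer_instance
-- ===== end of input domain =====

-- B replaces A's incremental membership loop with early return by two whole-grid
-- aggregates (set of all values, total count) compared once at the end ('simpler').

-- ===== PORT A =====
-- inner loop: 'for value in row: if value in values: return True; values.add(value)';
-- none = the early 'return True' fired, some s = updated set
def pvACells (row : List Int) (s : PySem.Set Int) : Option (PySem.Set Int) :=
  match row with
  | [] => some s
  | v :: vs => if PySem.Set.contains s v then none else pvACells vs (PySem.Set.add s v)

def pvARows (rows : List (List Int)) (s : PySem.Set Int) : Bool :=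
  match rows with
  | [] => false
  | r :: rs =>
    match pvACells r s with
    | none => true
    | some s' => pvARows rs s'

def check_duplicate_values (maze : List (List Int)) : Bool :=
  pvARows maze PySem.Set.empty

-- ===== PORT B =====
def check_duplicate_values_alt (maze : List (List Int)) : Bool :=
  let seen : PySem.Set Int := PySem.Set.ofList (maze.flatMap id)
  let total : Int := (maze.map PySem.List.len).sum
  decide (PySem.Set.len seen < total)

-- ===== PRECONDITION & SPEC =====
def Spec_check_duplicate_values (maze : List (List Int)) (out : Bool) : Prop := out = check_duplicate_values_alt maze
instance (maze : List (List Int)) (out : Bool) : Decidable (Spec_check_duplicate_values maze out) := by unfold Spec_check_duplicate_values; infer_instance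

-- ===== CLAIM (what is proved, stated in full; the proofs are below) =====
def Claim_equal_check_duplicate_values : Prop := ∀ (maze : List (List Int)), Dom_check_duplicate_values maze → Spec_check_duplicate_values maze (check_duplicate_values maze)

-- ===== LEMMAS AND PROOFS =====

-- A's inner loop: fails exactly when s ++ row has a duplicate, otherwise returns s ++ row
theorem pvACells_spec (row : List Int) (s : PySem.Set Int) (hs : s.Nodup) :
    pvACells row s = if (s ++ row).Nodup then some (s ++ row) else none := by
  induction row generalizing s with
  | nil => simp [pvACells, hs]
  | cons v vs ih =>
    by_cases hv : v ∈ s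
    · have : ¬ (s ++ v :: vs).Nodup := by
        intro h
        exact (List.disjoint_of_nodup_append h) hv (by simp)
      simp [pvACells, hv, this]
    · have hadd : PySem.Set.add s v = s ++ [v] := by
        simp [PySem.Set.add, hv]
      have hnd : (s ++ [v]).Nodup :=
        hs.append (List.nodup_singleton v) (by simp [List.disjoint_singleton, hv])
      rw [pvACells]
      simp only [PySem.Set.contains_iff]
      rw [if_neg (by simpa using hv), hadd, ih _ hnd, List.append_assoc]
      simp

-- A's outer loop: true iff s ++ flattened grid has a duplicate
theorem pvARows_spec (rows : List (List Int)) (s : PySem.Set Int) (hs : s.Nodup) :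
    pvARows rows s = !(s ++ rows.flatMap id).Nodup := by
  induction rows generalizing s with
  | nil => simp [pvARows, hs]
  | cons r rs ih =>
    rw [pvARows, pvACells_spec r s hs]
    by_cases h : (s ++ r).Nodup
    · rw [if_pos h]
      show pvARows rs (s ++ r) = _
      rw [ih _ h]
      simp [List.append_assoc]
    · rw [if_neg h]
      have hnot : ¬ (s ++ (r :: rs).flatMap id).Nodup := by
        rw [List.flatMap_cons, id_eq, ← List.append_assoc]
        intro hnd
        exact h (hnd.sublist (List.sublist_append_left _ _))
      simp only [List.flatMap_cons, id_eq, List.flatMap_id] at hnot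
      simp [hnot]

theorem ofList_length_lt_of_not_nodup (xs : List Int) (h : ¬ xs.Nodup) :
    (PySem.Set.ofList xs).length < xs.length := by
  induction xs with
  | nil => simp at h
  | cons x xs ih =>
    rw [PySem.Set.ofList_cons]
    by_cases hx : x ∈ xs
    · have hmem : x ∈ PySem.Set.ofList xs := (PySem.Set.mem_ofList xs x).mpr hx
      have hlt : ((PySem.Set.ofList xs).filter (fun y => !(y == x))).length
          < (PySem.Set.ofList xs).length :=
        List.length_filter_lt_length_iff_exists.mpr ⟨x, hmem, by simp⟩
      have hd : ((PySem.Set.ofList xs).discard x).length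
          = ((PySem.Set.ofList xs).filter (fun y => !(y == x))).length := rfl
      have hle := PySem.Set.length_ofList_le xs
      simp only [List.length_cons, hd]
      omega
    · have hxs : ¬ xs.Nodup := by
        intro hnd; exact h (List.nodup_cons.mpr ⟨hx, hnd⟩)
      have hlt := ih hxs
      have hle : ((PySem.Set.ofList xs).discard x).length ≤ (PySem.Set.ofList xs).length :=
        List.length_filter_le _ _
      simp only [List.length_cons]
      omega

theorem sum_map_len (rows : List (List Int)) :
    (rows.map PySem.List.len).sum = ((rows.flatten.length : Nat) : Int) := by
  induction rows with
  | nil => simp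
  | cons r rs ih => simp [PySem.List.len, ih, List.flatten_cons]

-- ===== VERDICT (by name: the statement is the Claim_ definition above) =====
theorem check_duplicate_values_spec : Claim_equal_check_duplicate_values := by
  intro maze _
  unfold Spec_check_duplicate_values check_duplicate_values check_duplicate_values_alt
  rw [pvARows_spec maze PySem.Set.empty (by simp [PySem.Set.empty])]
  simp only [PySem.Set.empty, List.nil_append, PySem.Set.len, List.flatMap_id]
  rw [sum_map_len]
  by_cases h : maze.flatten.Nodup
  · rw [PySem.Set.ofList_eq_self_of_nodup _ h]
    simp [h]
  · have hlt := ofList_length_lt_of_not_nodup maze.flatten h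
    have hcast : ((PySem.Set.ofList maze.flatten).length : Int)
        < ((maze.flatten.length : Nat) : Int) := by exact_mod_cast hlt
    simp only [h, decide_false, Bool.not_false, hcast, decide_true]
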